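-- pv_equiv track=rewrite | github.com/MUDIT-SINGH001/SEARCHING-AND-SORTING | double helix.py | DoubleHelix
-- ===== SOURCE A (Python) =====
-- def DoubleHelix(A,B,m,n):
--   sum1 = 0
--   sum2 = 0
--   i = 0
--   j = 0
--   while i < m and j < n:
--     if A[i] < B[j]:
--       sum1 += A[i]
--       i+=1
--     elif A[i] > B[j]:
--       sum2 += B[j]
--       j+=1
--     else:
--       sum1 += A[i]
--       sum2 += B[j]
--       sum1 = sum2 = max(sum1, sum2)
--       i=i+1
--       j=j+1
--   while i < m:
--     sum1 += A[i]
--     i+=1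
--   while j < n:
--     sum2 += B[j]
--     j+=1
--   return max(sum1, sum2)
-- ===== SOURCE B (Python) =====
-- def _seg(X, lo, hi):
--     s = 0
--     for k in range(lo, hi):
--         s += X[k]
--     return s
--
-- def DoubleHelix(A, B, m, n):
--     # Stage 1: an index-only merge collects the positions of the common (crossing) elements.
--     cuts = []
--     i = 0
--     j = 0
--     while i < m and j < n:
--         if A[i] < B[j]:
--             i += 1
--         elif A[i] > B[j]:
--             j += 1
--         else:
--             cuts.append((i, j))
--             i += 1
--             j += 1
--     # Stage 2: between consecutive crossings take the better segment sum, plus the crossing element.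
--     total = 0
--     pi = 0
--     pj = 0
--     for (ci, cj) in cuts:
--         total += max(_seg(A, pi, ci), _seg(B, pj, cj)) + A[ci]
--         pi = ci + 1
--         pj = cj + 1
--     return total + max(_seg(A, pi, m), _seg(B, pj, n))
-- ===== Notes on version B (the rewrite author's own statement) =====
-- stated objective: alternative
-- what changed: B is staged: a first index-only pass records the crossing positions (carrying no sums at all), then a second pass recomputes each inter-crossing segment sum directly from the arrays and commits max(segment)+crossing element, instead of A's single pass that levels two running totals in place.
import Mathlib
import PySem

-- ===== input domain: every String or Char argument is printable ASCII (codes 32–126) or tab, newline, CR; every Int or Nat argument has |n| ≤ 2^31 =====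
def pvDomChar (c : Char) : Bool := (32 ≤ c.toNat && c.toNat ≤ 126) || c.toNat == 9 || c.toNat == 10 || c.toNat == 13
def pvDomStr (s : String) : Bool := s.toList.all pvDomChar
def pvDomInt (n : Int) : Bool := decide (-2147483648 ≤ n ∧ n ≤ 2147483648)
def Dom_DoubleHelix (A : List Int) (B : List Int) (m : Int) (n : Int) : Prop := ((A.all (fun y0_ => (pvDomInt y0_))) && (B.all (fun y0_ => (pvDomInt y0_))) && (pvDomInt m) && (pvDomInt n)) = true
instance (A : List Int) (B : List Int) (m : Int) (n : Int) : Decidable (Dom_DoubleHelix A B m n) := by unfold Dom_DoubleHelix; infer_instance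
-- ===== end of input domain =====

-- B replaces A's single sum-carrying merge (which levels two running totals at each common element)
-- by two stages: an index-only merge collecting the crossing positions, then a second pass computing
-- each inter-crossing segment sum from the arrays and committing max(segment)+crossing element.
-- Objective: alternative decomposition, same O(m+n) cost. While loops are ported with fuel recursion;
-- the fuel passed at the call site is exactly the loop's measure.

-- ===== PORT A =====
-- main `while i < m and j < n` loop of A; returns (i, j, sum1, sum2) at loop exit.
-- A[i]/B[j] via pyGet?; the getD 0 default is never taken under Pre_ (indices in range there).
def dhMainA (A B : List Int) (m n : Int) : Nat → Int → Int → Int → Int → Int × Int × Int × Int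
  | 0, i, j, sum1, sum2 => (i, j, sum1, sum2)
  | fuel + 1, i, j, sum1, sum2 =>
    if i < m ∧ j < n then
      if (PySem.List.pyGet? A i).getD 0 < (PySem.List.pyGet? B j).getD 0 then
        dhMainA A B m n fuel (i + 1) j (sum1 + (PySem.List.pyGet? A i).getD 0) sum2
      else if (PySem.List.pyGet? A i).getD 0 > (PySem.List.pyGet? B j).getD 0 then
        dhMainA A B m n fuel i (j + 1) sum1 (sum2 + (PySem.List.pyGet? B j).getD 0)
      else
        dhMainA A B m n fuel (i + 1) (j + 1)
          (max (sum1 + (PySem.List.pyGet? A i).getD 0) (sum2 + (PySem.List.pyGet? B j).getD 0))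
          (max (sum1 + (PySem.List.pyGet? A i).getD 0) (sum2 + (PySem.List.pyGet? B j).getD 0))
    else (i, j, sum1, sum2)

-- `while i < m: sum1 += A[i]` tail loop of A
def dhTailA (A : List Int) (m : Int) : Nat → Int → Int → Int
  | 0, _, s => s
  | fuel + 1, i, s =>
    if i < m then dhTailA A m fuel (i + 1) (s + (PySem.List.pyGet? A i).getD 0) else s

def DoubleHelix (A : List Int) (B : List Int) (m : Int) (n : Int) : Int :=
  let r := dhMainA A B m n (m.toNat + n.toNat) 0 0 0 0
  max (dhTailA A m (m - r.1).toNat r.1 r.2.2.1) (dhTailA B n (n - r.2.1).toNat r.2.1 r.2.2.2)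

-- ===== PORT B =====
-- `_seg(X, lo, hi)`: for k in range(lo, hi): s += X[k]
def dhSeg (X : List Int) (lo hi : Int) : Int :=
  (PySem.List.pyRange lo hi 1).foldl (fun s k => s + (PySem.List.pyGet? X k).getD 0) 0

-- stage 1: the index-only merge collecting crossing positions (no sums carried)
def dhCuts (A B : List Int) (m n : Int) : Nat → Int → Int → List (Int × Int)
  | 0, _, _ => []
  | fuel + 1, i, j =>
    if i < m ∧ j < n then
      if (PySem.List.pyGet? A i).getD 0 < (PySem.List.pyGet? B j).getD 0 then
        dhCuts A B m n fuel (i + 1) j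
      else if (PySem.List.pyGet? A i).getD 0 > (PySem.List.pyGet? B j).getD 0 then
        dhCuts A B m n fuel i (j + 1)
      else
        (i, j) :: dhCuts A B m n fuel (i + 1) (j + 1)
    else []

-- stage 2: fold over the cuts carrying (total, pi, pj)
def dhStep (A B : List Int) (st : Int × Int × Int) (c : Int × Int) : Int × Int × Int :=
  (st.1 + max (dhSeg A st.2.1 c.1) (dhSeg B st.2.2 c.2) + (PySem.List.pyGet? A c.1).getD 0,
   c.1 + 1, c.2 + 1)

def DoubleHelix_alt (A : List Int) (B : List Int) (m : Int) (n : Int) : Int :=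
  let cuts := dhCuts A B m n (m.toNat + n.toNat) 0 0
  let st := cuts.foldl (dhStep A B) (0, 0, 0)
  st.1 + max (dhSeg A st.2.1 m) (dhSeg B st.2.2 n)

-- ===== PRECONDITION & SPEC =====
-- Pre_ excludes exactly the inputs where Python A raises IndexError (m beyond |A| or n beyond |B|); B raises there too.
def Pre_DoubleHelix (A : List Int) (B : List Int) (m : Int) (n : Int) : Prop :=
  m ≤ A.length ∧ n ≤ B.length
instance (A : List Int) (B : List Int) (m : Int) (n : Int) : Decidable (Pre_DoubleHelix A B m n) := by unfold Pre_DoubleHelix; infer_instance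

def pvWitness_DoubleHelix : List Int × List Int × Int × Int := ([1, 3, 5], [2, 3, 9], 3, 3)

def Spec_DoubleHelix (A : List Int) (B : List Int) (m : Int) (n : Int) (out : Int) : Prop := out = DoubleHelix_alt A B m n
instance (A : List Int) (B : List Int) (m : Int) (n : Int) (out : Int) : Decidable (Spec_DoubleHelix A B m n out) := by unfold Spec_DoubleHelix; infer_instance

-- ===== CLAIM =====
def Claim_equal_DoubleHelix : Prop := ∀ (A : List Int) (B : List Int) (m : Int) (n : Int), Dom_DoubleHelix A B m n → Pre_DoubleHelix A B m n → Spec_DoubleHelix A B m n (DoubleHelix A B m n)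

-- ===== LEMMAS AND PROOFS =====

-- foldl of the segment-sum body is linear in its accumulator
theorem dhSeg_shift (X : List Int) :
    ∀ (l : List Int) (a : Int),
      l.foldl (fun s k => s + (PySem.List.pyGet? X k).getD 0) a
        = a + l.foldl (fun s k => s + (PySem.List.pyGet? X k).getD 0) 0 := by
  intro l
  induction l with
  | nil => intro a; simp
  | cons x xs ih =>
      intro a
      simp only [List.foldl_cons]
      rw [ih (a + _), ih (0 + _)]
      ring

-- segment sums split at any interior point
theorem dhSeg_split (X : List Int) (lo mid hi : Int) (h1 : lo ≤ mid) (h2 : mid ≤ hi) :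
    dhSeg X lo mid + dhSeg X mid hi = dhSeg X lo hi := by
  unfold dhSeg
  rw [PySem.List.pyRange_one_append lo mid hi h1 h2, List.foldl_append]
  exact (dhSeg_shift X _ _).symm

theorem dhSeg_refl (X : List Int) (i : Int) : dhSeg X i i = 0 := by
  unfold dhSeg
  rw [PySem.List.pyRange_one_eq_nil le_rfl]
  rfl

theorem dhSeg_single (X : List Int) (i : Int) :
    dhSeg X i (i + 1) = (PySem.List.pyGet? X i).getD 0 := by
  unfold dhSeg
  rw [PySem.List.pyRange_one_singleton]
  simp

theorem dhSeg_of_ge (X : List Int) (i m : Int) (h : m ≤ i) : dhSeg X i m = 0 := by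
  unfold dhSeg
  rw [PySem.List.pyRange_one_eq_nil h]
  rfl

-- the tail loop from i to m (with fuel ≥ the loop measure) adds the segment sum of [i, m)
theorem dhTailA_seg (A : List Int) (m : Int) :
    ∀ (fuel : Nat) (i s : Int), (m - i).toNat ≤ fuel →
      dhTailA A m fuel i s = s + dhSeg A i m := by
  intro fuel
  induction fuel with
  | zero =>
      intro i s hf
      have hmi : m ≤ i := by omega
      simp [dhTailA, dhSeg_of_ge A i m hmi]
  | succ k ih =>
      intro i s hf
      by_cases h : i < m
      · rw [dhTailA, if_pos h, ih (i + 1) _ (by omega)]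
        have := dhSeg_split A i (i + 1) m (by omega) (by omega)
        rw [dhSeg_single] at this
        omega
      · simp [dhTailA, if_neg h, dhSeg_of_ge A i m (by omega)]

-- main invariant: A's sum-carrying merge (plus its tails) equals B's cuts fold (plus its final max),
-- where t is the committed total and pi/pj mark the start of the current segments
theorem dhMain_cuts (A B : List Int) (m n : Int) :
    ∀ (fuel : Nat) (i j t pi pj : Int),
      pi ≤ i → pj ≤ j → (i ≤ m ∨ pi = i) → (j ≤ n ∨ pj = j) →
      (let r := dhMainA A B m n fuel i j (t + dhSeg A pi i) (t + dhSeg B pj j)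
       max (dhTailA A m (m - r.1).toNat r.1 r.2.2.1)
           (dhTailA B n (n - r.2.1).toNat r.2.1 r.2.2.2))
      = (let st := (dhCuts A B m n fuel i j).foldl (dhStep A B) (t, pi, pj)
         st.1 + max (dhSeg A st.2.1 m) (dhSeg B st.2.2 n)) := by
  intro fuel
  induction fuel with
  | zero =>
      intro i j t pi pj hpi hpj hi hj
      have hA : dhSeg A pi i + dhSeg A i m = dhSeg A pi m := by
        rcases hi with hi | hpe
        · exact dhSeg_split A pi i m hpi hi
        · subst hpe; rw [dhSeg_refl]; ring
      have hB : dhSeg B pj j + dhSeg B j n = dhSeg B pj n := by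
        rcases hj with hj | hpe
        · exact dhSeg_split B pj j n hpj hj
        · subst hpe; rw [dhSeg_refl]; ring
      simp only [dhMainA, dhCuts, List.foldl_nil]
      rw [dhTailA_seg A m _ _ _ le_rfl, dhTailA_seg B n _ _ _ le_rfl]
      omega
  | succ k ih =>
      intro i j t pi pj hpi hpj hi hj
      by_cases h : i < m ∧ j < n
      · by_cases h1 : (PySem.List.pyGet? A i).getD 0 < (PySem.List.pyGet? B j).getD 0
        · have e1 : t + dhSeg A pi i + (PySem.List.pyGet? A i).getD 0 = t + dhSeg A pi (i + 1) := by
            rw [← dhSeg_split A pi i (i + 1) hpi (by omega), dhSeg_single]; ring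
          simp only [dhMainA, dhCuts, if_pos h, if_pos h1]
          rw [e1]
          exact ih (i + 1) j t pi pj (by omega) hpj (by omega) hj
        · by_cases h2 : (PySem.List.pyGet? A i).getD 0 > (PySem.List.pyGet? B j).getD 0
          · have e2 : t + dhSeg B pj j + (PySem.List.pyGet? B j).getD 0 = t + dhSeg B pj (j + 1) := by
              rw [← dhSeg_split B pj j (j + 1) hpj (by omega), dhSeg_single]; ring
            simp only [dhMainA, dhCuts, if_pos h, if_neg h1, if_pos h2]
            rw [e2]
            exact ih i (j + 1) t pi pj hpi (by omega) hi (by omega)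
          · have hxy : (PySem.List.pyGet? A i).getD 0 = (PySem.List.pyGet? B j).getD 0 := by omega
            simp only [dhMainA, dhCuts, if_pos h, if_neg h1, if_neg h2, List.foldl_cons]
            have emax : max (t + dhSeg A pi i + (PySem.List.pyGet? A i).getD 0)
                            (t + dhSeg B pj j + (PySem.List.pyGet? B j).getD 0)
                = t + max (dhSeg A pi i) (dhSeg B pj j) + (PySem.List.pyGet? A i).getD 0 := by
              omega
            have hih := ih (i + 1) (j + 1)
              (t + max (dhSeg A pi i) (dhSeg B pj j) + (PySem.List.pyGet? A i).getD 0)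
              (i + 1) (j + 1) le_rfl le_rfl (Or.inr rfl) (Or.inr rfl)
            rw [dhSeg_refl A (i + 1), dhSeg_refl B (j + 1), add_zero] at hih
            rw [emax]
            simpa [dhStep] using hih
      · have hA : dhSeg A pi i + dhSeg A i m = dhSeg A pi m := by
          rcases hi with hi | hpe
          · exact dhSeg_split A pi i m hpi hi
          · subst hpe; rw [dhSeg_refl]; ring
        have hB : dhSeg B pj j + dhSeg B j n = dhSeg B pj n := by
          rcases hj with hj | hpe
          · exact dhSeg_split B pj j n hpj hj
          · subst hpe; rw [dhSeg_refl]; ring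
        simp only [dhMainA, dhCuts, if_neg h, List.foldl_nil]
        rw [dhTailA_seg A m _ _ _ le_rfl, dhTailA_seg B n _ _ _ le_rfl]
        omega

-- ===== VERDICT =====
theorem DoubleHelix_spec : Claim_equal_DoubleHelix := by
  intro A B m n _hdom _hpre
  unfold Spec_DoubleHelix DoubleHelix DoubleHelix_alt
  have h := dhMain_cuts A B m n (m.toNat + n.toNat) 0 0 0 0 0
    le_rfl le_rfl (Or.inr rfl) (Or.inr rfl)
  simpa [dhSeg_refl] using h
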